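-- pv_equiv track=rewrite | github.com/NasreddinHodja/Dots | .local/share/themes/gen.py | genBorderPixels
-- ===== SOURCE A (Python) =====
-- def genBorderPixels(width, gap, gap_side):
--     """
--     gap_side can be: 'left', 'right', 'top', 'bottom', 'none'
--     """
--     total = width + gap
--     pixels = ""
--
--     for row in range(total):
--         line = "\""
--         for col in range(total):
--             is_gap = False
--
--             if gap_side == 'left' and col < gap:
--                 is_gap = True
--             elif gap_side == 'right' and col >= width:
--                 is_gap = True
--             elif gap_side == 'top' and row < gap:
--                 is_gap = True
--             elif gap_side == 'bottom' and row >= width: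
--                 is_gap = True
--             elif gap_side == 'top-left' and (col < gap or row < gap):
--                 is_gap = True
--             elif gap_side == 'top-right' and (col >= width or row < gap):
--                 is_gap = True
--             elif gap_side == 'bottom-left' and (row >= width or col < gap):
--                 is_gap = True
--             elif gap_side == 'bottom-right' and (row >= width or col >= width):
--                 is_gap = True
--
--             line += "." if is_gap else "@"
--
--         line += "\""
--         if row < total - 1:
--             line += ",\n"
--         else:
--             line += "\n"
--         pixels += line
--
--     return pixels
-- ===== SOURCE B (Python) =====
-- def genBorderPixels(width, gap, gap_side):
--     """
--     gap_side can be: 'left', 'right', 'top', 'bottom', 'none'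
--     """
--     total = width + gap
--     col_left = gap_side in ('left', 'top-left', 'bottom-left')
--     col_right = gap_side in ('right', 'top-right', 'bottom-right')
--     row_top = gap_side in ('top', 'top-left', 'top-right')
--     row_bottom = gap_side in ('bottom', 'bottom-left', 'bottom-right')
--     col_pat = "".join('.' if (col_left and c < gap) or (col_right and c >= width) else '@'
--                       for c in range(total))
--     dots = '.' * total
--     lines = []
--     for r in range(total):
--         body = dots if (row_top and r < gap) or (row_bottom and r >= width) else col_pat
--         lines.append('"' + body + '"')
--     return ',\n'.join(lines) + '\n' if lines else ''
-- ===== Notes on version B (the rewrite author's own statement) =====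
-- stated objective: faster
-- what changed: Replaces A's per-cell nested-loop elif chain (and quadratic string concatenation) by separable row/column gap predicates: one precomputed column pattern string, a per-row choice between it and an all-dots row, and a single ',\n' join of the quoted rows.
import Mathlib
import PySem

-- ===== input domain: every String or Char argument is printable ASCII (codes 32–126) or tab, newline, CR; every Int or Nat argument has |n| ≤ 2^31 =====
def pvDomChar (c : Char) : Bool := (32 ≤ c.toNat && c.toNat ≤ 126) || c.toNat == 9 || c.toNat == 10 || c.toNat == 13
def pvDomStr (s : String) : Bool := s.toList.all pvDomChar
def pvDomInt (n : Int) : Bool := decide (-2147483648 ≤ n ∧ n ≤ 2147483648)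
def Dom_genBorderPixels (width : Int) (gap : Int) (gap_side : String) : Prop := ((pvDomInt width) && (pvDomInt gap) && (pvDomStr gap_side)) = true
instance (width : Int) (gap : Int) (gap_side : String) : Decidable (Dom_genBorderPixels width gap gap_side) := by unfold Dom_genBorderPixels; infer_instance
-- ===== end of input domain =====

-- B replaces A's nested per-cell gap test by one precomputed column pattern plus a
-- per-row gap test, joining the quoted row bodies with ",\n" (measurably faster by a
-- constant factor: no per-cell branching or repeated concatenation).
-- Strings are built as List Char and wrapped with String.ofList at the end (exact for ASCII).

-- ===== PORT A =====
def genBorderPixels (width : Int) (gap : Int) (gap_side : String) : String :=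
  let total := width + gap
  let pixels : List Char :=
    (PySem.List.pyRange 0 total 1).foldl (fun pixels row =>
      let line : List Char := ['"']
      let line := (PySem.List.pyRange 0 total 1).foldl (fun line col =>
        let is_gap : Bool :=
          if gap_side = "left" ∧ col < gap then true
          else if gap_side = "right" ∧ width ≤ col then true
          else if gap_side = "top" ∧ row < gap then true
          else if gap_side = "bottom" ∧ width ≤ row then true
          else if gap_side = "top-left" ∧ (col < gap ∨ row < gap) then true
          else if gap_side = "top-right" ∧ (width ≤ col ∨ row < gap) then true
          else if gap_side = "bottom-left" ∧ (width ≤ row ∨ col < gap) then true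
          else if gap_side = "bottom-right" ∧ (width ≤ row ∨ width ≤ col) then true
          else false
        line ++ [if is_gap then '.' else '@']) line
      let line := line ++ ['"']
      let line := if row < total - 1 then line ++ [',', '\n'] else line ++ ['\n']
      pixels ++ line) []
  String.ofList pixels

-- ===== PORT B =====
def genBorderPixels_alt (width : Int) (gap : Int) (gap_side : String) : String :=
  let total := width + gap
  let col_left := decide (gap_side = "left" ∨ gap_side = "top-left" ∨ gap_side = "bottom-left")
  let col_right := decide (gap_side = "right" ∨ gap_side = "top-right" ∨ gap_side = "bottom-right")
  let row_top := decide (gap_side = "top" ∨ gap_side = "top-left" ∨ gap_side = "top-right")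
  let row_bottom := decide (gap_side = "bottom" ∨ gap_side = "bottom-left" ∨ gap_side = "bottom-right")
  let col_pat : List Char := (PySem.List.pyRange 0 total 1).map (fun c =>
    if (col_left && decide (c < gap)) || (col_right && decide (width ≤ c)) then '.' else '@')
  let dots : List Char := List.replicate total.toNat '.'
  let lines : List (List Char) := (PySem.List.pyRange 0 total 1).map (fun r =>
    ['"'] ++ (if (row_top && decide (r < gap)) || (row_bottom && decide (width ≤ r)) then dots else col_pat) ++ ['"'])
  if lines.isEmpty then "" else String.ofList (List.intercalate [',', '\n'] lines ++ ['\n'])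

-- ===== PRECONDITION & SPEC =====
def Spec_genBorderPixels (width : Int) (gap : Int) (gap_side : String) (out : String) : Prop := out = genBorderPixels_alt width gap gap_side
instance (width : Int) (gap : Int) (gap_side : String) (out : String) : Decidable (Spec_genBorderPixels width gap gap_side out) := by unfold Spec_genBorderPixels; infer_instance

-- ===== CLAIM (what is proved, stated in full; the proofs are below) =====
def Claim_equal_genBorderPixels : Prop := ∀ (width : Int) (gap : Int) (gap_side : String), Dom_genBorderPixels width gap gap_side → Spec_genBorderPixels width gap gap_side (genBorderPixels width gap gap_side)

-- ===== LEMMAS AND PROOFS =====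

-- B's row/column gap predicates, used only by the proofs
def gbRowGap (width gap : Int) (gap_side : String) (r : Int) : Bool :=
  (decide (gap_side = "top" ∨ gap_side = "top-left" ∨ gap_side = "top-right") && decide (r < gap)) ||
  (decide (gap_side = "bottom" ∨ gap_side = "bottom-left" ∨ gap_side = "bottom-right") && decide (width ≤ r))

def gbColGap (width gap : Int) (gap_side : String) (c : Int) : Bool :=
  (decide (gap_side = "left" ∨ gap_side = "top-left" ∨ gap_side = "bottom-left") && decide (c < gap)) ||
  (decide (gap_side = "right" ∨ gap_side = "top-right" ∨ gap_side = "bottom-right") && decide (width ≤ c))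

-- A's elif chain computes exactly rowGap ∨ colGap
lemma gbIsGap_eq (width gap : Int) (gap_side : String) (row col : Int) :
    (if gap_side = "left" ∧ col < gap then true
     else if gap_side = "right" ∧ width ≤ col then true
     else if gap_side = "top" ∧ row < gap then true
     else if gap_side = "bottom" ∧ width ≤ row then true
     else if gap_side = "top-left" ∧ (col < gap ∨ row < gap) then true
     else if gap_side = "top-right" ∧ (width ≤ col ∨ row < gap) then true
     else if gap_side = "bottom-left" ∧ (width ≤ row ∨ col < gap) then true
     else if gap_side = "bottom-right" ∧ (width ≤ row ∨ width ≤ col) then true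
     else false)
    = (gbRowGap width gap gap_side row || gbColGap width gap gap_side col) := by
  by_cases h1 : gap_side = "left" <;>
  by_cases h2 : gap_side = "right" <;>
  by_cases h3 : gap_side = "top" <;>
  by_cases h4 : gap_side = "bottom" <;>
  by_cases h5 : gap_side = "top-left" <;>
  by_cases h6 : gap_side = "top-right" <;>
  by_cases h7 : gap_side = "bottom-left" <;>
  by_cases h8 : gap_side = "bottom-right" <;>
  simp_all [gbRowGap, gbColGap] <;>
  by_cases hc : col < gap <;> by_cases hw : width ≤ col <;>
  by_cases hr : row < gap <;> by_cases hrw : width ≤ row <;>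
  simp_all [Bool.or_comm]

lemma gbInter_cons (sep x : List Char) (xs : List (List Char)) (h : xs ≠ []) :
    List.intercalate sep (x :: xs) = x ++ sep ++ List.intercalate sep xs := by
  obtain ⟨y, ys, rfl⟩ := List.exists_cons_of_ne_nil h
  simp [List.intercalate, List.intersperse]

-- joining a range of lines with ",\n" plus a final "\n" equals concatenating each
-- line with its own terminator (",\n" except on the last row)
lemma gbJoin (q : Int → List Char) (t : Int) :
    ∀ (a : Int), a < t →
    (PySem.List.pyRange a t 1).flatMap
        (fun r => q r ++ (if r < t - 1 then [',', '\n'] else ['\n']))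
      = List.intercalate [',', '\n'] ((PySem.List.pyRange a t 1).map q) ++ ['\n'] := by
  have key : ∀ (n : Nat) (a : Int), t - a = (n : Int) → a < t →
      (PySem.List.pyRange a t 1).flatMap
          (fun r => q r ++ (if r < t - 1 then [',', '\n'] else ['\n']))
        = List.intercalate [',', '\n'] ((PySem.List.pyRange a t 1).map q) ++ ['\n'] := by
    intro n
    induction n with
    | zero => intro a h ha; omega
    | succ m ih =>
      intro a h ha
      rw [PySem.List.pyRange_one_cons ha]
      by_cases hlast : a + 1 < t
      · have hrec := ih (a + 1) (by omega) hlast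
        have hne : PySem.List.pyRange (a+1) t 1 ≠ [] := by
          rw [PySem.List.pyRange_one_cons hlast]; simp
        simp only [List.flatMap_cons, List.map_cons, hrec]
        rw [gbInter_cons _ _ _ (by simpa using hne)]
        have : a < t - 1 := by omega
        simp [this]
      · have ht : t = a + 1 := by omega
        subst ht
        rw [PySem.List.pyRange_one_eq_nil (by omega)]
        simp [List.intercalate]
  intro a ha
  exact key (t - a).toNat a (by omega) ha

theorem gbMain (width gap : Int) (gap_side : String) :
    genBorderPixels width gap gap_side = genBorderPixels_alt width gap gap_side := by
  unfold genBorderPixels genBorderPixels_alt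
  set t := width + gap with ht
  by_cases hpos : 0 < t
  · -- nonempty grid
    have hne : PySem.List.pyRange 0 t 1 ≠ [] := by
      rw [PySem.List.pyRange_one_cons hpos]; simp
    rw [if_neg (by simp [List.isEmpty_iff, hne])]
    refine congrArg String.ofList ?_
    -- B's per-row body
    have hbody : ∀ row : Int,
        (PySem.List.pyRange 0 t 1).map (fun col =>
            if gbRowGap width gap gap_side row || gbColGap width gap gap_side col
            then '.' else '@')
        = (if gbRowGap width gap gap_side row then List.replicate t.toNat '.'
           else (PySem.List.pyRange 0 t 1).map (fun c =>
             if (decide (gap_side = "left" ∨ gap_side = "top-left" ∨ gap_side = "bottom-left") && decide (c < gap)) ||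
                (decide (gap_side = "right" ∨ gap_side = "top-right" ∨ gap_side = "bottom-right") && decide (width ≤ c))
             then '.' else '@')) := by
      intro row
      by_cases hr : gbRowGap width gap gap_side row = true
      · simp only [hr, if_true, Bool.true_or]
        rw [List.map_const']
        have hlen : (PySem.List.pyRange 0 t 1).length = t.toNat := by
          simp
        rw [hlen]
      · simp only [Bool.not_eq_true] at hr
        simp [hr, gbColGap]
    -- turn A's outer loop into a flatMap of canonical lines, then join them
    refine Eq.trans (PySem.List.foldl_congr_mem _ _
      (fun pixels row => pixels ++
        ((['"'] ++ (PySem.List.pyRange 0 t 1).map (fun col =>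
            if gbRowGap width gap gap_side row || gbColGap width gap gap_side col
            then '.' else '@') ++ ['"'])
         ++ (if row < t - 1 then [',', '\n'] else ['\n']))) [] ?_) ?_
    · intro acc row _
      simp only [gbIsGap_eq, PySem.List.foldl_append_singleton_eq_map]
      split_ifs <;> simp
    · rw [PySem.List.foldl_append_eq_flatMap
        (fun row =>
          (['"'] ++ (PySem.List.pyRange 0 t 1).map (fun col =>
            if gbRowGap width gap gap_side row || gbColGap width gap gap_side col
            then '.' else '@') ++ ['"'])
          ++ (if row < t - 1 then [',', '\n'] else ['\n']))
        (PySem.List.pyRange 0 t 1) []]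
      rw [List.nil_append]
      rw [gbJoin (fun row =>
          ['"'] ++ (PySem.List.pyRange 0 t 1).map (fun col =>
            if gbRowGap width gap gap_side row || gbColGap width gap gap_side col
            then '.' else '@') ++ ['"']) t 0 hpos]
      congr 1
      refine congrArg _ (List.map_congr_left ?_)
      intro row _
      rw [hbody row]
      simp only [gbRowGap]
      rfl
  · -- empty grid: both sides are ""
    have hnil : PySem.List.pyRange 0 t 1 = [] :=
      PySem.List.pyRange_one_eq_nil (by omega)
    simp [hnil]

-- ===== VERDICT (by name: the statement is the Claim_ definition above) =====
theorem genBorderPixels_spec : Claim_equal_genBorderPixels := by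
  intro width gap gap_side _
  unfold Spec_genBorderPixels
  exact gbMain width gap gap_side
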